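-- pv_equiv track=rewrite | github.com/mike-neergaard/wordguess | wordguess.py | assemble_wordlists
-- ===== SOURCE A (Python) =====
-- def write_reward(rs:str, guess_indices: list, word_indices: list):
--
--     # Universe of available matches
--     remaining = len(word_indices)
--
--     # Run through all the guesses looking for exact matches
--     for i in guess_indices:
--         if i in word_indices:
--             remaining -= 1
--             rs =rs[0:i]+"m"+rs[i+1:]
--
--     # Run through all the guesses again setting all possible wrong location
--     # matches
--     for i in guess_indices:
--         if rs[i] == "m": continue
--         if remaining > 0: rs=rs[0:i]+"w"+rs[i+1:]
--         remaining -= 1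
--     return rs
--
-- def letter_locations_dict(word: str):
--     ret_dict = {}
--     for letter in word:
--         if letter not in ret_dict:
--             ret_dict[letter]= [i for i,l in enumerate(word) if l==letter]
--     return ret_dict
--
-- def assemble_wordlists(guess:str, wordlist: list):
--
--     # We will fill our reward string with
--     # "-" for no match
--     # "m" for a match in that location
--     # "W" for a a match to the letter, but in the wrong location
--     # The rules will be that exact matches take priority followed
--     # by wrong location matches.  So for example if the word is
--     # "weeds" and the user guesses
--     # "emeer", the reward string would be
--     # "w-m--"
--
--     split_dict = {}
--     g_indices = letter_locations_dict(guess)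
--     for word in wordlist:
--         reward_string = "-"*5
--         w_indices = letter_locations_dict(word)
--         for l in g_indices.keys() & w_indices.keys():
--             reward_string = write_reward(reward_string,
--                         g_indices[l], w_indices[l])
--         split_dict.setdefault(reward_string, []).append(word)
--     len_dict = {key:len(split_dict[key]) for key in split_dict.keys()}
--     sorted_len = dict(sorted(len_dict.items(), key=lambda x:x[1], reverse=True))
--     ret_dict = {key:split_dict[key] for key in sorted_len.keys()}
--     return ret_dict
-- ===== SOURCE B (Python) =====
-- def assemble_wordlists(guess: str, wordlist: list):
--     # Position-based two-pass Wordle scorer instead of per-letter index bookkeeping.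
--     split_dict = {}
--     for word in wordlist:
--         reward = ["-"] * 5
--         avail = {}
--         for i, ch in enumerate(word):
--             if i < len(guess) and guess[i] == ch:
--                 reward[i] = "m"
--             else:
--                 avail[ch] = avail.get(ch, 0) + 1
--         for i, ch in enumerate(guess):
--             if reward[i] != "m" and avail.get(ch, 0) > 0:
--                 reward[i] = "w"
--                 avail[ch] -= 1
--         split_dict.setdefault("".join(reward), []).append(word)
--     return dict(sorted(split_dict.items(), key=lambda kv: len(kv[1]), reverse=True))
-- ===== Notes on version B (the rewrite author's own statement) =====
-- stated objective: idiomatic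
-- what changed: Replaced A's per-distinct-letter bookkeeping (letter_locations_dict index lists + write_reward string splicing, iterated over a key-set intersection) with the standard position-based two-pass Wordle scorer (pass 1 marks exact matches and counts unmatched target letters, pass 2 hands out 'w' left-to-right), and the len_dict/sorted/rebuild tail with a single sorted() over the items.
-- outside the precondition, e.g. on assemble_wordlists('abcdef', ['zzzzzf']): A returns {'-----m': ['zzzzzf']}, B raises IndexError; on assemble_wordlists('aaaaaa', ['aaaaaa']): A returns {'mmmmmm': ['aaaaaa']}, B raises IndexError
import Mathlib
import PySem

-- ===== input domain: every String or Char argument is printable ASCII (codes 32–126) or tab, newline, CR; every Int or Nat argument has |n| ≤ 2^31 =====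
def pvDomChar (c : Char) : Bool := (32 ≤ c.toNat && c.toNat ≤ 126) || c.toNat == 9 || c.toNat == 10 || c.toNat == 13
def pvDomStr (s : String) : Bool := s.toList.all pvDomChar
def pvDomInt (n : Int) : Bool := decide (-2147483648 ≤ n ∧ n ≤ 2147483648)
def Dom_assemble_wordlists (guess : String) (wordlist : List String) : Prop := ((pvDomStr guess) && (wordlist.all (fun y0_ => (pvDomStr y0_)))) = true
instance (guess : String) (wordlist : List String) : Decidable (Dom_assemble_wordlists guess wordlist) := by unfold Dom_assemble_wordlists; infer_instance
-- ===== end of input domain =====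

-- B replaces A's per-letter index bookkeeping (letter_locations_dict + write_reward) by a standard
-- position-based two-pass Wordle scorer; same return value, different decomposition (objective: idiomatic).

-- ===== PORT A =====
-- Reward strings are ported as List Char (PySem string facts live on the char lists);
-- rs[0:i] + c + rs[i+1:]
def pvSplice (rs : List Char) (i : Int) (c : Char) : List Char :=
  PySem.List.slice rs (some 0) (some i) ++ [c] ++ PySem.List.slice rs (some (i + 1)) none

def write_reward (rs : List Char) (guess_indices word_indices : List Int) : List Char :=
  -- remaining = len(word_indices); first loop: exact matches
  let st1 := guess_indices.foldl
    (fun (st : List Char × Int) i =>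
      if i ∈ word_indices then (pvSplice st.1 i 'm', st.2 - 1) else st)
    (rs, PySem.List.len word_indices)
  -- second loop; Python's rs[i] read is ported with a '-' default: it raises only for i out of
  -- range, which Pre_ rules out (every guess index is < len(guess) ≤ 5 = len rs)
  (guess_indices.foldl
    (fun (st : List Char × Int) i =>
      if PySem.List.pyGetD st.1 i '-' = 'm' then st
      else ((if st.2 > 0 then pvSplice st.1 i 'w' else st.1), st.2 - 1))
    st1).1

def letter_locations_dict (word : List Char) : PySem.Dict Char (List Int) :=
  word.foldl
    (fun d letter =>
      if d.contains letter then d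
      else d.insert letter
        (((word.zipIdx).filter (fun p => p.1 == letter)).map (fun p => ((p.2 : Nat) : Int))))
    PySem.Dict.empty

-- the per-word body of A's loop (reward-string assembly), kept as a helper
def pv_a_reward (g_indices : PySem.Dict Char (List Int)) (ws : List Char) : List Char :=
  let w_indices := letter_locations_dict ws
  -- 'g_indices.keys() & w_indices.keys()': Python iterates this set in hash order, which PySem does
  -- not model; write_reward's per-letter writes touch disjoint positions of the reward string, so
  -- the resulting string does not depend on that order — we iterate in key (first-occurrence) order.
  let inter := PySem.Set.inter (PySem.Set.ofList g_indices.keys) w_indices.keys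
  inter.foldl
    (fun rs l => write_reward rs (g_indices.getD l []) (w_indices.getD l []))
    (List.replicate 5 '-')

def assemble_wordlists (guess : String) (wordlist : List String) : List (String × List String) :=
  let g_indices := letter_locations_dict guess.toList
  let split_dict : PySem.Dict String (List String) := wordlist.foldl
    (fun sd word =>
      -- split_dict.setdefault(reward_string, []).append(word)
      sd.modify (String.ofList (pv_a_reward g_indices word.toList)) [] (· ++ [word]))
    PySem.Dict.empty
  let len_dict : PySem.Dict String Int := split_dict.keys.foldl
    (fun d key => d.insert key (PySem.List.len (split_dict.getD key []))) PySem.Dict.empty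
  -- dict(sorted(...)) over the distinct keys of len_dict keeps the sorted order
  let sorted_len := PySem.List.sorted len_dict.items (fun x => x.2) true
  let ret_dict : PySem.Dict String (List String) := (sorted_len.map (fun kv => kv.1)).foldl
    (fun d key => d.insert key (split_dict.getD key [])) PySem.Dict.empty
  ret_dict.items

-- ===== PORT B =====
-- two-pass positional scorer: pass 1 marks 'm' and counts the unmatched target letters,
-- pass 2 walks the guess left to right handing out 'w' while letters remain available.
-- reward[i] is read/written with total getD/set: under Pre_ every index is < 5 = len reward.
def pv_score (gs ws : List Char) : List Char :=
  let st1 : List Char × PySem.Dict Char Int := ws.zipIdx.foldl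
    (fun st p =>
      if p.2 < gs.length ∧ gs.getD p.2 ' ' = p.1 then (st.1.set p.2 'm', st.2)
      else (st.1, st.2.insert p.1 (st.2.getD p.1 0 + 1)))
    (List.replicate 5 '-', PySem.Dict.empty)
  (gs.zipIdx.foldl
    (fun st p =>
      if st.1.getD p.2 '-' ≠ 'm' ∧ st.2.getD p.1 0 > 0 then
        (st.1.set p.2 'w', st.2.insert p.1 (st.2.getD p.1 0 - 1))
      else st)
    st1).1

def assemble_wordlists_alt (guess : String) (wordlist : List String) : List (String × List String) :=
  let split_dict : PySem.Dict String (List String) := wordlist.foldl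
    (fun sd word => sd.modify (String.ofList (pv_score guess.toList word.toList)) [] (· ++ [word]))
    PySem.Dict.empty
  -- dict(sorted(split_dict.items(), key=lambda kv: len(kv[1]), reverse=True))
  ((PySem.List.sorted split_dict.items (fun kv => PySem.List.len kv.2) true).foldl
    (fun d kv => d.insert kv.1 kv.2) PySem.Dict.empty).items

-- ===== PRECONDITION & SPEC =====
-- Pre_ excludes guesses longer than 5 characters (unless the wordlist is empty, when the scoring
-- loop never runs): there A's out-of-range reward-string indexing raises IndexError or splices
-- reward strings longer than 5 together, and B itself raises IndexError.
def Pre_assemble_wordlists (guess : String) (wordlist : List String) : Prop :=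
  guess.toList.length ≤ 5 ∨ wordlist = []
instance (guess : String) (wordlist : List String) : Decidable (Pre_assemble_wordlists guess wordlist) := by
  unfold Pre_assemble_wordlists; infer_instance

def pvWitness_assemble_wordlists : String × List String := ("emeer", ["weeds", "emeer", "abcde"])

def Spec_assemble_wordlists (guess : String) (wordlist : List String) (out : List (String × List String)) : Prop := out = assemble_wordlists_alt guess wordlist
instance (guess : String) (wordlist : List String) (out : List (String × List String)) : Decidable (Spec_assemble_wordlists guess wordlist out) := by unfold Spec_assemble_wordlists; infer_instance

-- ===== CLAIM (what is proved, stated in full; the proofs are below) =====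
def Claim_equal_assemble_wordlists : Prop := ∀ (guess : String) (wordlist : List String), Dom_assemble_wordlists guess wordlist → Pre_assemble_wordlists guess wordlist → Spec_assemble_wordlists guess wordlist (assemble_wordlists guess wordlist)

-- ===== LEMMAS AND PROOFS =====

-- the common characterisation of the reward string: position i is 'm' on an exact match, 'w' when
-- the number of earlier non-exact guess positions holding the same letter is still below the number
-- of unmatched occurrences of that letter in the word, '-' otherwise.
def pvExact (gs ws : List Char) (i : Nat) : Bool :=
  match gs[i]?, ws[i]? with
  | some a, some b => a == b
  | _, _ => false

def pvAvail0 (gs ws : List Char) (l : Char) : Nat :=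
  ((ws.zipIdx).filter (fun p => !pvExact gs ws p.2 && (p.1 == l))).length

def pvRank (gs ws : List Char) (k : Nat) (l : Char) : Nat :=
  (((gs.take k).zipIdx).filter (fun p => !pvExact gs ws p.2 && (p.1 == l))).length

def pvSpecChar (gs ws : List Char) (i : Nat) : Char :=
  if pvExact gs ws i then 'm'
  else if i < gs.length ∧ pvRank gs ws i (gs.getD i ' ') < pvAvail0 gs ws (gs.getD i ' ') then 'w'
  else '-'

def pvSpec (gs ws : List Char) : List Char := (List.range 5).map (pvSpecChar gs ws)


-- basic facts about pvExact / pvRank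
lemma pvExact_ge_gs (gs ws : List Char) (i : Nat) (h : gs.length ≤ i) : pvExact gs ws i = false := by
  unfold pvExact
  rw [List.getElem?_eq_none h]

lemma pvExact_ge_ws (gs ws : List Char) (i : Nat) (h : ws.length ≤ i) : pvExact gs ws i = false := by
  unfold pvExact
  rw [List.getElem?_eq_none (l := ws) h]
  cases gs[i]? <;> rfl

lemma pvExact_append (gs ws : List Char) (c : Char) (i : Nat) (h : i < ws.length) :
    pvExact gs (ws ++ [c]) i = pvExact gs ws i := by
  unfold pvExact
  rw [List.getElem?_append_left h]

lemma pvExact_append_last (gs ws : List Char) (c : Char) :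
    pvExact gs (ws ++ [c]) ws.length
      = (decide (ws.length < gs.length) && (gs.getD ws.length ' ' == c)) := by
  unfold pvExact
  rw [List.getElem?_append_right (Nat.le_refl _)]
  simp only [Nat.sub_self, List.getElem?_cons_zero]
  by_cases h : ws.length < gs.length
  · rw [List.getElem?_eq_getElem h]
    simp [List.getD, h, List.getElem?_eq_getElem]
  · rw [List.getElem?_eq_none (Nat.le_of_not_lt h)]
    simp [h]

lemma pvAvail0_append (gs ws : List Char) (c : Char) (l : Char) :
    pvAvail0 gs (ws ++ [c]) l
      = pvAvail0 gs ws l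
        + (if (!decide (ws.length < gs.length ∧ gs.getD ws.length ' ' = c)) && (c == l) then 1 else 0) := by
  unfold pvAvail0
  rw [List.zipIdx_append, List.filter_append, List.length_append]
  congr 1
  · congr 1
    apply List.filter_congr
    intro p hp
    rcases p with ⟨x, i⟩
    have := List.mem_zipIdx hp
    rw [pvExact_append gs ws c i (by omega)]
  · simp only [List.zipIdx, Nat.zero_add, List.filter]
    rw [pvExact_append_last]
    by_cases h1 : ws.length < gs.length
    · have hgd : gs.getD ws.length ' ' = gs[ws.length] := List.getD_eq_getElem gs ' ' h1
      by_cases h2 : gs[ws.length] = c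
      · have : (decide (ws.length < gs.length) && (gs.getD ws.length ' ' == c)) = true := by
          simp [h1, hgd, h2]
        rw [this]
        simp [h1, hgd, h2]
      · have : (decide (ws.length < gs.length) && (gs.getD ws.length ' ' == c)) = false := by
          simp [h1, hgd, h2]
        rw [this]
        by_cases hcl : c = l
        · subst hcl; simp [h1, hgd]; exact h2
        · have hb : (c == l) = false := by simp [hcl]
          simp [hb]
    · have : (decide (ws.length < gs.length) && (gs.getD ws.length ' ' == c)) = false := by
        simp [h1]
      rw [this]
      by_cases hcl : c = l
      · subst hcl; simp [h1]
      · have hb : (c == l) = false := by simp [hcl]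
        simp [hb]

-- pass 1 of pv_score: the reward marks exactly the exact matches, and the dictionary holds
-- the unmatched letter counts
lemma pass1B (gs : List Char) (hg : gs.length ≤ 5) (ws : List Char) :
    (ws.zipIdx.foldl
      (fun (st : List Char × PySem.Dict Char Int) p =>
        if p.2 < gs.length ∧ gs.getD p.2 ' ' = p.1 then (st.1.set p.2 'm', st.2)
        else (st.1, st.2.insert p.1 (st.2.getD p.1 0 + 1)))
      (List.replicate 5 '-', PySem.Dict.empty)).1
      = (List.range 5).map (fun i => if pvExact gs ws i then 'm' else '-')
    ∧ ∀ l, (ws.zipIdx.foldl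
      (fun (st : List Char × PySem.Dict Char Int) p =>
        if p.2 < gs.length ∧ gs.getD p.2 ' ' = p.1 then (st.1.set p.2 'm', st.2)
        else (st.1, st.2.insert p.1 (st.2.getD p.1 0 + 1)))
      (List.replicate 5 '-', PySem.Dict.empty)).2.getD l 0 = (pvAvail0 gs ws l : Int) := by
  induction ws using List.reverseRecOn with
  | nil =>
      constructor
      · apply List.ext_getElem
        · simp
        · intro i h1 h2
          simp only [List.zipIdx_nil, List.foldl_nil] at h1 ⊢
          simp only [List.length_replicate] at h1
          simp [pvExact_ge_ws gs [] i (by simp)]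
          interval_cases i <;> rfl
      · intro l
        unfold pvAvail0
        simp [PySem.Dict.getD_empty]
  | append_singleton ws c ih =>
      rw [List.zipIdx_append, List.foldl_append]
      obtain ⟨ih1, ih2⟩ := ih
      set st := ws.zipIdx.foldl
        (fun (st : List Char × PySem.Dict Char Int) p =>
          if p.2 < gs.length ∧ gs.getD p.2 ' ' = p.1 then (st.1.set p.2 'm', st.2)
          else (st.1, st.2.insert p.1 (st.2.getD p.1 0 + 1)))
        (List.replicate 5 '-', PySem.Dict.empty) with hst
      simp only [List.zipIdx, Nat.zero_add, List.foldl_cons, List.foldl_nil]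
      have hlast := pvExact_append_last gs ws c
      by_cases hcond : ws.length < gs.length ∧ gs.getD ws.length ' ' = c
      · have hgd : gs.getD ws.length ' ' = gs[ws.length] := List.getD_eq_getElem gs ' ' hcond.1
        have hex : pvExact gs (ws ++ [c]) ws.length = true := by
          rw [hlast, hcond.2]
          simp [hcond.1]
        rw [if_pos hcond]
        constructor
        · apply List.ext_getElem
          · simp [ih1]
          · intro i hi1 hi2
            simp only [List.length_set, ih1, List.length_map, List.length_range] at hi1
            simp only [List.getElem_set, ih1, List.getElem_map, List.getElem_range]
            by_cases hil : ws.length = i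
            · subst hil; simp [hex]
            · rcases Nat.lt_or_ge i ws.length with hlt | hge
              · simp [hil, pvExact_append gs ws c i hlt]
              · simp [hil, pvExact_ge_ws gs ws i hge,
                  pvExact_ge_ws gs (ws ++ [c]) i (by simp; omega)]
        · intro l
          rw [ih2 l, pvAvail0_append]
          have hb : (!decide (ws.length < gs.length ∧ gs.getD ws.length ' ' = c)) = false := by
            simp only [hcond]; simp
          rw [hb]
          simp
      · have hex : pvExact gs (ws ++ [c]) ws.length = false := by
          rw [hlast]
          by_cases h1 : ws.length < gs.length
          · have h2 : ¬ gs.getD ws.length ' ' = c := fun hc => hcond ⟨h1, hc⟩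
            simp only [h1, decide_true, Bool.true_and]
            simpa using h2
          · simp [h1]
        rw [if_neg hcond]
        constructor
        · rw [ih1]
          apply List.ext_getElem
          · simp
          · intro i hi1 hi2
            simp only [List.getElem_map, List.getElem_range]
            by_cases hil : i = ws.length
            · subst hil; simp [hex, pvExact_ge_ws gs ws ws.length (Nat.le_refl _)]
            · rcases Nat.lt_or_ge i ws.length with hlt | hge
              · simp [pvExact_append gs ws c i hlt]
              · simp [pvExact_ge_ws gs ws i hge,
                  pvExact_ge_ws gs (ws ++ [c]) i (by simp; omega)]
        · intro l
          rw [PySem.Dict.getD_insert, pvAvail0_append]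
          have hb : (!decide (ws.length < gs.length ∧ gs.getD ws.length ' ' = c)) = true := by
            simp only [hcond]; simp
          rw [hb]
          by_cases hcl : l = c
          · subst hcl
            rw [if_pos rfl, ih2 l]
            simp
          · rw [if_neg hcl, ih2 l]
            have hlc : ¬ c = l := fun h => hcl h.symm
            have : (c == l) = false := by simpa using hlc
            simp [this]


lemma pvRank_zero (gs ws : List Char) (l : Char) : pvRank gs ws 0 l = 0 := by
  simp [pvRank]

lemma pvRank_succ (gs ws : List Char) (k : Nat) (hk : k < gs.length) (l : Char) :
    pvRank gs ws (k + 1) l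
      = pvRank gs ws k l + (if !pvExact gs ws k && (gs[k] == l) then 1 else 0) := by
  unfold pvRank
  rw [List.take_succ, List.getElem?_eq_getElem hk]
  simp only [Option.toList_some]
  rw [List.zipIdx_append, List.filter_append, List.length_append]
  congr 1
  have hlen : (gs.take k).length = k := List.length_take_of_le (Nat.le_of_lt hk)
  simp only [List.zipIdx, hlen, Nat.zero_add, List.filter]
  by_cases hb : (!pvExact gs ws k && (gs[k] == l)) = true
  · rw [hb]; simp
  · rw [Bool.not_eq_true] at hb; rw [hb]; simp

lemma pass2B (gs ws : List Char) (hg : gs.length ≤ 5) :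
    ∀ n k, gs.length - k = n → k ≤ gs.length →
    ∀ (rs : List Char) (d : PySem.Dict Char Int),
    rs = (List.range 5).map
      (fun i => if i < k then pvSpecChar gs ws i else if pvExact gs ws i then 'm' else '-') →
    (∀ l, d.getD l 0 = (pvAvail0 gs ws l : Int) - min (pvRank gs ws k l) (pvAvail0 gs ws l)) →
    (((gs.drop k).zipIdx k).foldl
      (fun (st : List Char × PySem.Dict Char Int) p =>
        if st.1.getD p.2 '-' ≠ 'm' ∧ st.2.getD p.1 0 > 0 then
          (st.1.set p.2 'w', st.2.insert p.1 (st.2.getD p.1 0 - 1))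
        else st) (rs, d)).1 = pvSpec gs ws := by
  intro n
  induction n with
  | zero =>
      intro k hn hk rs d hrs hd
      have hk' : k = gs.length := by omega
      subst hk'
      rw [List.drop_length]
      simp only [List.zipIdx_nil, List.foldl_nil]
      rw [hrs]
      apply List.map_congr_left
      intro i hi
      by_cases hik : i < gs.length
      · simp [hik]
      · have hex : pvExact gs ws i = false := pvExact_ge_gs gs ws i (by omega)
        simp only [hik, if_neg hik, hex]
        unfold pvSpecChar
        simp [hex, hik]
  | succ n ihn =>
      intro k hn hk rs d hrs hd
      have hklt : k < gs.length := by omega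
      have hk5 : k < 5 := by omega
      rw [List.drop_eq_getElem_cons hklt, List.zipIdx_cons, List.foldl_cons]
      have hrsk : rs.getD k '-' = (if pvExact gs ws k then 'm' else '-') := by
        rw [hrs]
        rw [List.getD_eq_getElem _ '-' (by simp [hk5])]
        simp [List.getElem_map, List.getElem_range, hk5]
      have hgdk : gs.getD k ' ' = gs[k] := List.getD_eq_getElem gs ' ' hklt
      by_cases hx : pvExact gs ws k = true
      · have hcond : ¬ (rs.getD k '-' ≠ 'm' ∧ d.getD gs[k] 0 > 0) := by
          rw [hrsk, hx]; simp
        rw [if_neg hcond]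
        apply ihn (k+1) (by omega) (by omega)
        · rw [hrs]
          apply List.map_congr_left
          intro i hi
          by_cases hik : i = k
          · subst hik
            simp only [Nat.lt_irrefl, if_neg (Nat.lt_irrefl i), Nat.lt_succ_of_le (Nat.le_refl i),
              if_pos (Nat.lt_succ_self i)]
            unfold pvSpecChar
            rw [hx]
            rfl
          · have : (i < k + 1) = (i < k) := by
              by_cases h : i < k <;> simp [h] <;> omega
            simp only [this]
        · intro l
          rw [hd l, pvRank_succ gs ws k hklt l, hx]
          simp
      · rw [Bool.not_eq_true] at hx
        have hne : rs.getD k '-' ≠ 'm' := by rw [hrsk, hx]; simp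
        have hdk := hd gs[k]
        by_cases hlt : pvRank gs ws k gs[k] < pvAvail0 gs ws gs[k]
        · have hcond : rs.getD k '-' ≠ 'm' ∧ d.getD gs[k] 0 > 0 := by
            refine ⟨hne, ?_⟩
            rw [hdk]
            omega
          rw [if_pos hcond]
          apply ihn (k+1) (by omega) (by omega)
          · rw [hrs]
            apply List.ext_getElem (by simp)
            intro i hi1 hi2
            simp only [List.getElem_set, List.getElem_map, List.getElem_range,
              List.length_map, List.length_range] at hi1 ⊢
            by_cases hik : k = i
            · subst hik
              simp only [if_pos rfl, if_pos (Nat.lt_succ_self k)]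
              unfold pvSpecChar
              rw [hx, hgdk]
              simp [hklt, hlt]
            · have : (i < k + 1) = (i < k) := by
                by_cases h : i < k <;> simp [h] <;> omega
              simp [hik, this]
          · intro l
            rw [PySem.Dict.getD_insert, pvRank_succ gs ws k hklt l, hx]
            by_cases hcl : l = gs[k]
            · subst hcl
              rw [if_pos rfl, hdk]
              simp only [Bool.not_false, BEq.rfl, Bool.and_true, if_pos]
              omega
            · rw [if_neg hcl, hd l]
              have : (gs[k] == l) = false := by
                have : ¬ gs[k] = l := fun h => hcl h.symm
                simpa using this
              simp [this]
        · have hcond : ¬ (rs.getD k '-' ≠ 'm' ∧ d.getD gs[k] 0 > 0) := by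
            intro hc
            rw [hdk] at hc
            omega
          rw [if_neg hcond]
          apply ihn (k+1) (by omega) (by omega)
          · rw [hrs]
            apply List.map_congr_left
            intro i hi
            by_cases hik : i = k
            · subst hik
              simp only [Nat.lt_irrefl, if_neg (Nat.lt_irrefl i), if_pos (Nat.lt_succ_self i)]
              unfold pvSpecChar
              rw [hx, hgdk]
              simp [hx, hlt]
            · have : (i < k + 1) = (i < k) := by
                by_cases h : i < k <;> simp [h] <;> omega
              simp only [this]
          · intro l
            rw [hd l, pvRank_succ gs ws k hklt l, hx]
            by_cases hcl : gs[k] = l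
            · simp only [hcl, Bool.not_false, BEq.rfl, Bool.and_true, if_pos]
              rw [← hcl]
              omega
            · have : (gs[k] == l) = false := by simpa using hcl
              simp [this]

lemma scoreB_eq (gs ws : List Char) (hg : gs.length ≤ 5) : pv_score gs ws = pvSpec gs ws := by
  unfold pv_score
  obtain ⟨h1, h2⟩ := pass1B gs hg ws
  have := pass2B gs ws hg gs.length 0 (by omega) (by omega)
    ((ws.zipIdx.foldl
      (fun (st : List Char × PySem.Dict Char Int) p =>
        if p.2 < gs.length ∧ gs.getD p.2 ' ' = p.1 then (st.1.set p.2 'm', st.2)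
        else (st.1, st.2.insert p.1 (st.2.getD p.1 0 + 1)))
      (List.replicate 5 '-', PySem.Dict.empty)).1)
    ((ws.zipIdx.foldl
      (fun (st : List Char × PySem.Dict Char Int) p =>
        if p.2 < gs.length ∧ gs.getD p.2 ' ' = p.1 then (st.1.set p.2 'm', st.2)
        else (st.1, st.2.insert p.1 (st.2.getD p.1 0 + 1)))
      (List.replicate 5 '-', PySem.Dict.empty)).2)
    (by rw [h1]; simp)
    (by intro l; rw [h2 l, pvRank_zero]; simp)
  simpa using this


-- ---- A-side: letter positions and counting bridges ----
def pvLocs (w : List Char) (l : Char) : List Int :=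
  ((w.zipIdx).filter (fun p => p.1 == l)).map (fun p => ((p.2 : Nat) : Int))

lemma pvLocs_eq_range (w : List Char) (l : Char) :
    pvLocs w l = ((List.range w.length).filter (fun j => w.getD j ' ' == l)).map
      (fun j => ((j : Nat) : Int)) := by
  unfold pvLocs
  induction w using List.reverseRecOn with
  | nil => simp
  | append_singleton w c ih =>
      rw [List.zipIdx_append, List.filter_append, List.map_append, ih]
      rw [List.length_append, List.length_singleton, List.range_succ, List.filter_append,
        List.map_append]
      congr 1
      · congr 1
        apply List.filter_congr
        intro j hj
        rw [List.mem_range] at hj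
        rw [List.getD_append _ _ _ _ hj]
      · have hc0 : [c].getD 0 ' ' = c := rfl
        simp only [List.zipIdx, Nat.zero_add, List.filter,
          List.getD_append_right _ _ _ _ (Nat.le_refl _), Nat.sub_self, hc0]
        cases hb : (c == l) <;> rfl

lemma zipIdx_filter_len (w : List Char) (q : Char → Nat → Bool) :
    (w.zipIdx.filter (fun p => q p.1 p.2)).length
      = ((List.range w.length).filter (fun j => q (w.getD j ' ') j)).length := by
  induction w using List.reverseRecOn with
  | nil => simp
  | append_singleton w c ih =>
      rw [List.zipIdx_append, List.filter_append, List.length_append, ih]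
      rw [List.length_append, List.length_singleton, List.range_succ, List.filter_append,
        List.length_append]
      congr 1
      · congr 1
        apply List.filter_congr
        intro j hj
        rw [List.mem_range] at hj
        rw [List.getD_append _ _ _ _ hj]
      · have hc0 : [c].getD 0 ' ' = c := rfl
        simp only [List.zipIdx, Nat.zero_add, List.filter,
          List.getD_append_right _ _ _ _ (Nat.le_refl _), Nat.sub_self, hc0]
        cases hb : q c w.length <;> rfl

lemma mem_pvLocs (w : List Char) (l : Char) (j : Nat) :
    ((j : Int) ∈ pvLocs w l) ↔ (j < w.length ∧ w.getD j ' ' = l) := by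
  rw [pvLocs_eq_range, List.mem_map]
  constructor
  · rintro ⟨j', hj', hcast⟩
    have : j' = j := by exact_mod_cast hcast
    subst this
    rw [List.mem_filter, List.mem_range] at hj'
    exact ⟨hj'.1, by simpa using hj'.2⟩
  · intro ⟨h1, h2⟩
    exact ⟨j, by rw [List.mem_filter, List.mem_range]; exact ⟨h1, by simpa using h2⟩, rfl⟩

lemma pvLocs_shape (w : List Char) (l : Char) :
    ∀ x ∈ pvLocs w l, ∃ j : Nat, x = (j : Int) ∧ j < w.length := by
  intro x hx
  rw [pvLocs_eq_range, List.mem_map] at hx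
  obtain ⟨j, hj, rfl⟩ := hx
  rw [List.mem_filter, List.mem_range] at hj
  exact ⟨j, rfl, hj.1⟩

lemma pvLocs_pairwise (w : List Char) (l : Char) : (pvLocs w l).Pairwise (· < ·) := by
  rw [pvLocs_eq_range]
  apply List.Pairwise.map
  · intro a b (h : a < b); exact_mod_cast h
  · exact (List.pairwise_lt_range).filter _

-- filter-length bookkeeping
lemma length_filter_split {α : Type} (xs : List α) (p q : α → Bool) :
    (xs.filter p).length
      = (xs.filter (fun x => q x && p x)).length + (xs.filter (fun x => !q x && p x)).length := by
  induction xs with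
  | nil => simp
  | cons x xs ih =>
      simp only [List.filter]
      by_cases hq : q x = true <;> by_cases hp : p x = true <;>
        simp [hq, hp, ih] <;> omega

lemma filter_range_extend (p : Nat → Bool) :
    ∀ n n', n ≤ n' → (∀ j, n ≤ j → p j = false) →
    (List.range n').filter p = (List.range n).filter p := by
  intro n n' h hp
  induction n' with
  | zero => have : n = 0 := by omega
            subst this; rfl
  | succ m ih =>
      by_cases hm : n = m + 1
      · subst hm; rfl
      · have hnm : n ≤ m := by omega
        rw [List.range_succ, List.filter_append, ih hnm]
        simp [hp m hnm]

lemma filter_range_lt (p : Nat → Bool) (i n : Nat) (h : i ≤ n) :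
    (List.range n).filter (fun j => decide (j < i) && p j) = (List.range i).filter p := by
  rw [filter_range_extend _ i n h (fun j hj => by simp [Nat.not_lt.mpr hj])]
  apply List.filter_congr
  intro j hj
  rw [List.mem_range] at hj
  simp [hj]

-- letter_locations_dict: lookups and key membership
lemma lld_fold_contains (w : List Char) (l : Char) :
    ∀ (xs : List Char) (d : PySem.Dict Char (List Int)),
    ((xs.foldl (fun d letter =>
      if d.contains letter then d
      else d.insert letter
        (((w.zipIdx).filter (fun p => p.1 == letter)).map (fun p => ((p.2 : Nat) : Int))))
      d).contains l) = (decide (l ∈ xs) || d.contains l) := by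
  intro xs
  induction xs with
  | nil => simp
  | cons c xs ih =>
      intro d
      simp only [List.foldl_cons]
      by_cases hc : d.contains c = true
      · rw [if_pos hc, ih d]
        by_cases hlc : l = c
        · subst hlc; simp [hc]
        · simp [hlc]
      · rw [if_neg hc, ih _]
        rw [PySem.Dict.contains_insert]
        by_cases hlc : l = c
        · subst hlc; simp
        · have : (l == c) = false := by simpa using hlc
          simp [this, hlc]

lemma lld_contains (w : List Char) (l : Char) :
    (letter_locations_dict w).contains l = decide (l ∈ w) := by
  unfold letter_locations_dict
  rw [lld_fold_contains w l w PySem.Dict.empty]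
  simp

lemma lld_fold_getD (w : List Char) (l : Char) :
    ∀ (xs : List Char) (d : PySem.Dict Char (List Int)),
    ((xs.foldl (fun d letter =>
      if d.contains letter then d
      else d.insert letter
        (((w.zipIdx).filter (fun p => p.1 == letter)).map (fun p => ((p.2 : Nat) : Int))))
      d).getD l [])
      = if d.contains l = true then d.getD l []
        else if l ∈ xs then pvLocs w l else [] := by
  intro xs
  induction xs with
  | nil =>
      intro d
      simp only [List.foldl_nil, List.not_mem_nil, if_false]
      by_cases hc : d.contains l = true
      · rw [if_pos hc]
      · rw [if_neg hc]
        exact PySem.Dict.getD_of_not_contains d [] (by simpa using hc)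
  | cons c xs ih =>
      intro d
      simp only [List.foldl_cons]
      by_cases hc : d.contains c = true
      · rw [if_pos hc, ih d]
        by_cases hlc : l = c
        · subst hlc; simp [hc]
        · simp [List.mem_cons, hlc]
      · rw [if_neg hc, ih _]
        rw [PySem.Dict.contains_insert, PySem.Dict.getD_insert]
        by_cases hlc : l = c
        · subst hlc; simp [hc, pvLocs]
        · have hbeq : (l == c) = false := by simpa using hlc
          simp [hbeq, hlc]

lemma lld_getD (w : List Char) (l : Char) :
    (letter_locations_dict w).getD l [] = if l ∈ w then pvLocs w l else [] := by
  unfold letter_locations_dict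
  rw [lld_fold_getD w l w PySem.Dict.empty]
  simp


lemma pvSplice_set (rs : List Char) (j : Nat) (c : Char) (h : j < rs.length) :
    pvSplice rs (j : Int) c = rs.set j c := by
  unfold pvSplice
  have h0 : (some (0 : Int)) = (some ((0 : Nat) : Int)) := rfl
  have h1 : ((j : Int) + 1) = (((j + 1 : Nat)) : Int) := by push_cast; ring
  rw [h0, PySem.List.slice_natCast rs 0 j, h1,
    PySem.List.slice_from rs (by positivity)]
  rw [List.set_eq_take_append_cons_drop]
  simp [h]

lemma getD_set_lt (rs : List Char) (j i : Nat) (c : Char) (hi : i < rs.length)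
    (hj : j < rs.length) :
    (rs.set j c).getD i '-' = if j = i then c else rs.getD i '-' := by
  rw [List.getD_eq_getElem _ _ (by simpa using hi), List.getElem_set,
    List.getD_eq_getElem _ _ hi]

lemma wrA1 (wi : List Int) :
    ∀ (gi : List Int), (∀ x ∈ gi, ∃ j : Nat, x = (j : Int) ∧ j < 5) →
    ∀ (rs : List Char) (rem : Int), rs.length = 5 →
    ((gi.foldl (fun (st : List Char × Int) i =>
        if i ∈ wi then (pvSplice st.1 i 'm', st.2 - 1) else st) (rs, rem)).1.length = 5
    ∧ (∀ i : Nat, i < 5 →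
        (gi.foldl (fun (st : List Char × Int) i =>
          if i ∈ wi then (pvSplice st.1 i 'm', st.2 - 1) else st) (rs, rem)).1.getD i '-'
        = if (i : Int) ∈ gi ∧ (i : Int) ∈ wi then 'm' else rs.getD i '-')
    ∧ (gi.foldl (fun (st : List Char × Int) i =>
        if i ∈ wi then (pvSplice st.1 i 'm', st.2 - 1) else st) (rs, rem)).2
      = rem - ((gi.filter (fun x => decide (x ∈ wi))).length : Int)) := by
  intro gi
  induction gi with
  | nil => intro _ rs rem hlen; simp [hlen]
  | cons x gi ih =>
      intro hsh rs rem hlen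
      obtain ⟨j, rfl, hj5⟩ := hsh x List.mem_cons_self
      have hsh' := fun y hy => hsh y (List.mem_cons_of_mem _ hy)
      simp only [List.foldl_cons, List.filter]
      by_cases hx : ((j : Int)) ∈ wi
      · rw [if_pos hx]
        have hset : pvSplice rs (j : Int) 'm' = rs.set j 'm' := pvSplice_set rs j 'm' (by omega)
        rw [hset]
        obtain ⟨ihl, ihp, ihc⟩ := ih hsh' (rs.set j 'm') (rem - 1) (by simp [hlen])
        refine ⟨ihl, ?_, ?_⟩
        · intro i hi
          rw [ihp i hi]
          by_cases hmem : ((i : Int)) ∈ gi ∧ ((i : Int)) ∈ wi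
          · rw [if_pos hmem, if_pos ⟨List.mem_cons_of_mem _ hmem.1, hmem.2⟩]
          · rw [if_neg hmem, getD_set_lt rs j i 'm' (by omega) (by omega)]
            by_cases hij : j = i
            · subst hij
              rw [if_pos rfl, if_pos ⟨List.mem_cons_self, hx⟩]
            · rw [if_neg hij, if_neg]
              rintro ⟨hmem1, hmem2⟩
              rcases List.mem_cons.mp hmem1 with hc | hc
              · exact hij (by exact_mod_cast hc.symm)
              · exact hmem ⟨hc, hmem2⟩
        · rw [ihc]
          simp only [hx, decide_true, List.length_cons]
          push_cast
          ring
      · rw [if_neg hx]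
        obtain ⟨ihl, ihp, ihc⟩ := ih hsh' rs rem hlen
        refine ⟨ihl, ?_, ?_⟩
        · intro i hi
          rw [ihp i hi]
          congr 1
          · apply propext
            constructor
            · rintro ⟨h1, h2⟩; exact ⟨List.mem_cons_of_mem _ h1, h2⟩
            · rintro ⟨h1, h2⟩
              rcases List.mem_cons.mp h1 with hc | hc
              · exact absurd (hc ▸ h2) hx
              · exact ⟨hc, h2⟩
        · rw [ihc]
          simp [hx]

lemma wrA2 (gs ws : List Char) :
    ∀ (gi : List Int), (∀ x ∈ gi, ∃ j : Nat, x = (j : Int) ∧ j < 5) → gi.Pairwise (· < ·) →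
    ∀ (rs : List Char) (rem : Int), rs.length = 5 →
    (∀ x ∈ gi, ∀ j : Nat, x = (j : Int) → rs.getD j '-' = (if pvExact gs ws j then 'm' else '-')) →
    ((gi.foldl (fun (st : List Char × Int) i =>
        if PySem.List.pyGetD st.1 i '-' = 'm' then st
        else ((if st.2 > 0 then pvSplice st.1 i 'w' else st.1), st.2 - 1)) (rs, rem)).1.length = 5
    ∧ ∀ i : Nat, i < 5 →
        (gi.foldl (fun (st : List Char × Int) i =>
          if PySem.List.pyGetD st.1 i '-' = 'm' then st
          else ((if st.2 > 0 then pvSplice st.1 i 'w' else st.1), st.2 - 1)) (rs, rem)).1.getD i '-'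
        = if (i : Int) ∈ gi ∧ pvExact gs ws i = false
              ∧ ((gi.filter (fun x => decide (x < (i : Int)) && !pvExact gs ws x.toNat)).length : Int) < rem
          then 'w' else rs.getD i '-') := by
  intro gi
  induction gi with
  | nil => intro _ _ rs rem hlen _; simp [hlen]
  | cons x gi ih =>
      intro hsh hpw rs rem hlen hmk
      obtain ⟨j, rfl, hj5⟩ := hsh x List.mem_cons_self
      have hsh' := fun y hy => hsh y (List.mem_cons_of_mem _ hy)
      have hgt : ∀ y ∈ gi, (j : Int) < y := (List.pairwise_cons.mp hpw).1
      have hpw' := (List.pairwise_cons.mp hpw).2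
      have hread : PySem.List.pyGetD rs ((j : Nat) : Int) '-' = rs.getD j '-' := by
        simp [PySem.List.pyGetD_natCast]
      have hrsj := hmk _ List.mem_cons_self j rfl
      have hnmj : ((j : Int)) ∉ gi := fun hc => absurd (hgt _ hc) (lt_irrefl _)
      simp only [List.foldl_cons, hread, hrsj]
      by_cases hx : pvExact gs ws j = true
      · rw [if_pos (by rw [hx]; simp)]
        obtain ⟨ihl, ihp⟩ := ih hsh' hpw' rs rem hlen
          (fun y hy => hmk y (List.mem_cons_of_mem _ hy))
        refine ⟨ihl, ?_⟩
        intro i hi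
        rw [ihp i hi]
        have hcnt : ∀ i' : Nat, (decide ((j : Int) < (i' : Int)) && !pvExact gs ws ((j : Nat) : Int).toNat) = false := by
          intro i'; simp [Int.toNat_natCast, hx]
        by_cases hij : j = i
        · subst hij
          rw [if_neg (by rintro ⟨h1, _, _⟩; exact hnmj h1),
            if_neg (by rintro ⟨_, h2, _⟩; rw [hx] at h2; simp at h2)]
        · rw [List.filter_cons, hcnt i]
          congr 1
          apply propext
          constructor
          · rintro ⟨h1, h2, h3⟩; exact ⟨List.mem_cons_of_mem _ h1, h2, h3⟩
          · rintro ⟨h1, h2, h3⟩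
            rcases List.mem_cons.mp h1 with hc | hc
            · exact absurd (by exact_mod_cast hc.symm) hij
            · exact ⟨hc, h2, h3⟩
      · rw [Bool.not_eq_true] at hx
        rw [if_neg (by rw [hx]; simp)]
        have hxcnt : (!pvExact gs ws ((j : Nat) : Int).toNat) = true := by
          simp [Int.toNat_natCast, hx]
        by_cases hrem : rem > 0
        · rw [if_pos hrem]
          have hset : pvSplice rs (j : Int) 'w' = rs.set j 'w' := pvSplice_set rs j 'w' (by omega)
          rw [hset]
          obtain ⟨ihl, ihp⟩ := ih hsh' hpw' (rs.set j 'w') (rem - 1) (by simp [hlen])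
            (by
              intro y hy j' hy'
              subst hy'
              have hne : j ≠ j' := by
                have := hgt _ hy
                intro hc; subst hc; exact absurd this (lt_irrefl _)
              have hj'5 : j' < 5 := by
                obtain ⟨j2, he, h5⟩ := hsh' _ hy
                have : j' = j2 := by exact_mod_cast he
                omega
              rw [getD_set_lt rs j j' 'w' (by omega) (by omega), if_neg hne]
              exact hmk _ (List.mem_cons_of_mem _ hy) j' rfl)
          refine ⟨ihl, ?_⟩
          intro i hi
          rw [ihp i hi]
          by_cases hij : j = i
          · subst hij
            rw [if_neg (by rintro ⟨h1, _, _⟩; exact hnmj h1)]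
            rw [getD_set_lt rs j j 'w' (by omega) (by omega), if_pos rfl]
            rw [if_pos]
            refine ⟨List.mem_cons_self, hx, ?_⟩
            have hzero : (List.filter (fun x => decide (x < ((j : Nat) : Int)) && !pvExact gs ws x.toNat)
                (((j : Nat) : Int) :: gi)).length = 0 := by
              rw [List.length_eq_zero_iff, List.filter_eq_nil_iff]
              intro y hy
              rcases List.mem_cons.mp hy with hc | hc
              · subst hc; simp
              · have := hgt _ hc
                simp only [Bool.and_eq_true, decide_eq_true_eq]
                rintro ⟨h1, _⟩
                omega
            rw [hzero]
            exact_mod_cast hrem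
          · rw [getD_set_lt rs j i 'w' (by omega) (by omega), if_neg hij]
            by_cases hmem : ((i : Int)) ∈ gi
            · have hji : (j : Int) < (i : Int) := hgt _ hmem
              have hone : (decide ((j : Int) < ((i : Nat) : Int)) && !pvExact gs ws ((j : Nat) : Int).toNat) = true := by
                simp only [hxcnt, Bool.and_true]
                exact decide_eq_true hji
              rw [List.filter_cons, hone]
              simp only [List.length_cons]
              congr 1
              apply propext
              constructor
              · rintro ⟨h1, h2, h3⟩
                refine ⟨List.mem_cons_of_mem _ h1, h2, ?_⟩
                push_cast [List.length_cons] at h3 ⊢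
                omega
              · rintro ⟨h1, h2, h3⟩
                refine ⟨hmem, h2, ?_⟩
                push_cast [List.length_cons] at h3 ⊢
                omega
            · rw [if_neg (by rintro ⟨h1, _, _⟩; exact hmem h1), if_neg]
              rintro ⟨h1, _, _⟩
              rcases List.mem_cons.mp h1 with hc | hc
              · exact hij (by exact_mod_cast hc.symm)
              · exact hmem hc
        · rw [if_neg hrem]
          obtain ⟨ihl, ihp⟩ := ih hsh' hpw' rs (rem - 1) hlen
            (fun y hy => hmk y (List.mem_cons_of_mem _ hy))
          refine ⟨ihl, ?_⟩
          intro i hi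
          rw [ihp i hi]
          by_cases hij : j = i
          · subst hij
            rw [if_neg (by rintro ⟨h1, _, _⟩; exact hnmj h1), if_neg]
            rintro ⟨_, _, h3⟩
            have : (0 : Int) ≤ ((List.filter (fun x => decide (x < ((j : Nat) : Int)) && !pvExact gs ws x.toNat)
              (((j : Nat) : Int) :: gi)).length : Int) := by positivity
            omega
          · by_cases hmem : ((i : Int)) ∈ gi
            · have hji : (j : Int) < (i : Int) := hgt _ hmem
              have hone : (decide ((j : Int) < ((i : Nat) : Int)) && !pvExact gs ws ((j : Nat) : Int).toNat) = true := by
                simp only [hxcnt, Bool.and_true]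
                exact decide_eq_true hji
              rw [List.filter_cons, hone]
              simp only [List.length_cons]
              congr 1
              apply propext
              constructor
              · rintro ⟨h1, h2, h3⟩
                refine ⟨List.mem_cons_of_mem _ h1, h2, ?_⟩
                push_cast [List.length_cons] at h3 ⊢
                omega
              · rintro ⟨h1, h2, h3⟩
                refine ⟨hmem, h2, ?_⟩
                push_cast [List.length_cons] at h3 ⊢
                omega
            · rw [if_neg (by rintro ⟨h1, _, _⟩; exact hmem h1), if_neg]
              rintro ⟨h1, _, _⟩
              rcases List.mem_cons.mp h1 with hc | hc
              · exact hij (by exact_mod_cast hc.symm)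
              · exact hmem hc


lemma pvExact_iff (gs ws : List Char) (i : Nat) :
    pvExact gs ws i = true ↔ (i < gs.length ∧ i < ws.length ∧ gs.getD i ' ' = ws.getD i ' ') := by
  unfold pvExact
  by_cases h1 : i < gs.length
  · by_cases h2 : i < ws.length
    · rw [List.getElem?_eq_getElem h1, List.getElem?_eq_getElem h2]
      simp [h1, h2, List.getD_eq_getElem _ _ h1, List.getD_eq_getElem _ _ h2]
    · rw [List.getElem?_eq_none (Nat.le_of_not_lt h2)]
      cases hx : gs[i]? <;> simp [h2]
  · rw [List.getElem?_eq_none (l := gs) (Nat.le_of_not_lt h1)]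
    simp [h1]

lemma pvAvail0_range (gs ws : List Char) (l : Char) :
    pvAvail0 gs ws l
      = ((List.range ws.length).filter (fun j => !pvExact gs ws j && (ws.getD j ' ' == l))).length := by
  unfold pvAvail0
  exact zipIdx_filter_len ws (fun c j => !pvExact gs ws j && (c == l))

lemma pvRank_range (gs ws : List Char) (k : Nat) (hk : k ≤ gs.length) (l : Char) :
    pvRank gs ws k l
      = ((List.range k).filter (fun j => !pvExact gs ws j && (gs.getD j ' ' == l))).length := by
  unfold pvRank
  rw [zipIdx_filter_len (gs.take k) (fun c j => !pvExact gs ws j && (c == l))]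
  rw [List.length_take_of_le hk]
  congr 1
  apply List.filter_congr
  intro j hj
  rw [List.mem_range] at hj
  rw [List.getD_eq_getElem _ _ (by rw [List.length_take_of_le hk]; exact hj),
    List.getD_eq_getElem _ _ (by omega), List.getElem_take]

lemma pvRemaining_eq_avail0 (gs ws : List Char) (l : Char) :
    ((pvLocs gs l).filter (fun x => decide (x ∈ pvLocs ws l))).length + pvAvail0 gs ws l
      = (pvLocs ws l).length := by
  have hwi : (pvLocs ws l).length
      = ((List.range ws.length).filter (fun j => ws.getD j ' ' == l)).length := by
    rw [pvLocs_eq_range, List.length_map]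
  have hsplit := length_filter_split (List.range ws.length)
    (fun j => ws.getD j ' ' == l) (fun j => pvExact gs ws j)
  rw [hwi, hsplit, pvAvail0_range]
  congr 1
  rw [pvLocs_eq_range gs l, List.filter_map, List.length_map, List.filter_filter]
  simp only [Function.comp_def]
  have hL : (List.range gs.length).filter
        (fun j => decide (((j : Nat) : Int) ∈ pvLocs ws l) && (gs.getD j ' ' == l))
      = (List.range gs.length).filter
        (fun j => decide (j < gs.length) && (decide (j < ws.length)
          && ((gs.getD j ' ' == l) && (ws.getD j ' ' == l)))) := by
    apply List.filter_congr
    intro j hj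
    rw [List.mem_range] at hj
    by_cases hm : ((j : Nat) : Int) ∈ pvLocs ws l
    · obtain ⟨h1, h2⟩ := (mem_pvLocs ws l j).mp hm
      simp only [decide_eq_true hm, decide_eq_true hj, decide_eq_true h1,
        (by simpa using h2 : (ws.getD j ' ' == l) = true), Bool.true_and, Bool.and_true]
    · have hmf : (decide (((j : Nat) : Int) ∈ pvLocs ws l)) = false := by simpa using hm
      rw [mem_pvLocs] at hm
      by_cases h1 : j < ws.length
      · have h2 : ws.getD j ' ' ≠ l := fun hc => hm ⟨h1, hc⟩
        simp only [hmf, (by simpa using h2 : (ws.getD j ' ' == l) = false),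
          Bool.false_and, Bool.and_false]
      · simp only [hmf, (by simpa using h1 : (decide (j < ws.length)) = false),
          Bool.false_and, Bool.and_false]
  have hR : (List.range ws.length).filter
        (fun j => pvExact gs ws j && (ws.getD j ' ' == l))
      = (List.range ws.length).filter
        (fun j => decide (j < gs.length) && (decide (j < ws.length)
          && ((gs.getD j ' ' == l) && (ws.getD j ' ' == l)))) := by
    apply List.filter_congr
    intro j hj
    rw [List.mem_range] at hj
    by_cases hx : pvExact gs ws j = true
    · obtain ⟨h1, h2, h3⟩ := (pvExact_iff gs ws j).mp hx
      by_cases hwl : ws.getD j ' ' = l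
      · have hgl : gs.getD j ' ' = l := by rw [h3, hwl]
        simp only [hx, decide_eq_true h1, decide_eq_true h2,
          (by simpa using hwl : (ws.getD j ' ' == l) = true),
          (by simpa using hgl : (gs.getD j ' ' == l) = true), Bool.true_and, Bool.and_true]
      · simp only [(by simpa using hwl : (ws.getD j ' ' == l) = false),
          Bool.and_false]
    · rw [Bool.not_eq_true] at hx
      rw [hx, Bool.false_and]
      by_cases h1 : j < gs.length
      · by_cases hgl : gs.getD j ' ' = l
        · by_cases hwl : ws.getD j ' ' = l
          · exfalso
            have : pvExact gs ws j = true :=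
              (pvExact_iff gs ws j).mpr ⟨h1, hj, by rw [hgl, hwl]⟩
            rw [this] at hx
            exact absurd hx (by simp)
          · simp only [(by simpa using hwl : (ws.getD j ' ' == l) = false),
              Bool.and_false]
        · simp only [(by simpa using hgl : (gs.getD j ' ' == l) = false),
            Bool.false_and, Bool.and_false]
      · simp only [(by simpa using h1 : (decide (j < gs.length)) = false), Bool.false_and]
  rw [hL, hR]
  rcases Nat.le_total gs.length ws.length with hle | hle
  · rw [filter_range_extend _ gs.length ws.length hle
      (fun j hj => by simp [Nat.not_lt.mpr hj])]
  · rw [filter_range_extend _ ws.length gs.length hle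
      (fun j hj => by simp [Nat.not_lt.mpr hj])]

lemma pvCnt_eq_rank (gs ws : List Char) (l : Char) (i : Nat) (hi : i ≤ gs.length) :
    ((pvLocs gs l).filter
        (fun x => decide (x < ((i : Nat) : Int)) && !pvExact gs ws x.toNat)).length
      = pvRank gs ws i l := by
  rw [pvLocs_eq_range gs l, List.filter_map, List.length_map, List.filter_filter]
  simp only [Function.comp_def]
  rw [pvRank_range gs ws i hi l]
  have hcongr : (List.range gs.length).filter
        (fun j => (decide (((j : Nat) : Int) < ((i : Nat) : Int)) && !pvExact gs ws ((j : Nat) : Int).toNat)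
          && (gs.getD j ' ' == l))
      = (List.range gs.length).filter
        (fun j => decide (j < i) && (!pvExact gs ws j && (gs.getD j ' ' == l))) := by
    apply List.filter_congr
    intro j hj
    have hcast : (decide (((j : Nat) : Int) < ((i : Nat) : Int))) = decide (j < i) := by
      simp
    rw [hcast, Int.toNat_natCast]
    cases hb1 : (gs.getD j ' ' == l) <;> cases hb2 : decide (j < i) <;>
      cases hb3 : pvExact gs ws j <;> rfl
  rw [hcongr, filter_range_lt _ i gs.length hi]


lemma wr_spec (gs ws : List Char) (hg : gs.length ≤ 5) (l : Char) (rs : List Char)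
    (hlen : rs.length = 5)
    (hrs : ∀ i : Nat, i < gs.length → gs.getD i ' ' = l → rs.getD i '-' = '-') :
    (write_reward rs (pvLocs gs l) (pvLocs ws l)).length = 5
    ∧ ∀ i : Nat, i < 5 → (write_reward rs (pvLocs gs l) (pvLocs ws l)).getD i '-'
        = if i < gs.length ∧ gs.getD i ' ' = l then pvSpecChar gs ws i else rs.getD i '-' := by
  have hshape : ∀ x ∈ pvLocs gs l, ∃ j : Nat, x = (j : Int) ∧ j < 5 := by
    intro x hx
    obtain ⟨j, rfl, hj⟩ := pvLocs_shape gs l x hx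
    exact ⟨j, rfl, by omega⟩
  have hexact_mem : ∀ j : Nat, j < gs.length → gs.getD j ' ' = l →
      (((j : Nat) : Int) ∈ pvLocs ws l ↔ pvExact gs ws j = true) := by
    intro j h1 h2
    rw [mem_pvLocs, pvExact_iff]
    constructor
    · rintro ⟨hw1, hw2⟩
      exact ⟨h1, hw1, by rw [h2, hw2]⟩
    · rintro ⟨_, hw1, hw2⟩
      exact ⟨hw1, by rw [← hw2, h2]⟩
  obtain ⟨h1len, h1p, h1c⟩ := wrA1 (pvLocs ws l) (pvLocs gs l) hshape rs
    (PySem.List.len (pvLocs ws l)) hlen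
  obtain ⟨h2len, h2p⟩ := wrA2 gs ws (pvLocs gs l) hshape (pvLocs_pairwise gs l)
    ((pvLocs gs l).foldl (fun (st : List Char × Int) i =>
        if i ∈ pvLocs ws l then (pvSplice st.1 i 'm', st.2 - 1) else st)
      (rs, PySem.List.len (pvLocs ws l))).1
    ((pvLocs gs l).foldl (fun (st : List Char × Int) i =>
        if i ∈ pvLocs ws l then (pvSplice st.1 i 'm', st.2 - 1) else st)
      (rs, PySem.List.len (pvLocs ws l))).2
    h1len
    (by
      intro x hx j hxj
      subst hxj
      obtain ⟨hjg, hjl⟩ := (mem_pvLocs gs l j).mp hx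
      rw [h1p j (by omega)]
      by_cases hexa : pvExact gs ws j = true
      · rw [if_pos ⟨hx, (hexact_mem j hjg hjl).mpr hexa⟩, if_pos hexa]
      · rw [if_neg (fun hc => hexa ((hexact_mem j hjg hjl).mp hc.2)), if_neg hexa]
        exact hrs j hjg hjl)
  rw [Prod.mk.eta] at h2len h2p
  have hrem : ((pvLocs gs l).foldl (fun (st : List Char × Int) i =>
        if i ∈ pvLocs ws l then (pvSplice st.1 i 'm', st.2 - 1) else st)
      (rs, PySem.List.len (pvLocs ws l))).2 = (pvAvail0 gs ws l : Int) := by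
    rw [h1c]
    have := pvRemaining_eq_avail0 gs ws l
    rw [PySem.List.len_eq]
    push_cast
    omega
  constructor
  · unfold write_reward
    exact h2len
  · intro i hi
    unfold write_reward
    rw [h2p i hi, hrem]
    by_cases hin : i < gs.length ∧ gs.getD i ' ' = l
    · have hmemgi : ((i : Nat) : Int) ∈ pvLocs gs l := (mem_pvLocs gs l i).mpr hin
      rw [if_pos hin]
      by_cases hx : pvExact gs ws i = true
      · rw [if_neg (by rintro ⟨_, h2, _⟩; rw [hx] at h2; simp at h2)]
        rw [h1p i hi, if_pos ⟨hmemgi, (hexact_mem i hin.1 hin.2).mpr hx⟩]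
        unfold pvSpecChar
        rw [if_pos hx]
      · rw [Bool.not_eq_true] at hx
        have hcnt := pvCnt_eq_rank gs ws l i (by omega)
        by_cases hlt : pvRank gs ws i l < pvAvail0 gs ws l
        · rw [if_pos ⟨hmemgi, hx, by rw [hcnt]; exact_mod_cast hlt⟩]
          unfold pvSpecChar
          rw [hx]
          simp only [Bool.false_eq_true, if_false, hin.2]
          rw [if_pos ⟨hin.1, hlt⟩]
        · rw [if_neg (by
            rintro ⟨_, _, h3⟩
            rw [hcnt] at h3
            exact hlt (by exact_mod_cast h3))]
          rw [h1p i hi,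
            if_neg (fun hc => (by rw [(hexact_mem i hin.1 hin.2).mp hc.2] at hx; simp at hx : False)),
            hrs i hin.1 hin.2]
          unfold pvSpecChar
          rw [hx]
          simp only [Bool.false_eq_true, if_false, hin.2]
          rw [if_neg (fun hc => hlt hc.2)]
    · have hnm : ((i : Nat) : Int) ∉ pvLocs gs l := fun hc => hin ((mem_pvLocs gs l i).mp hc)
      rw [if_neg hin, if_neg (by rintro ⟨h1, _, _⟩; exact hnm h1),
        h1p i hi, if_neg (by rintro ⟨h1, _⟩; exact hnm h1)]

lemma foldA (gs ws : List Char) (hg : gs.length ≤ 5) :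
    ∀ (L : List Char), L.Nodup → (∀ l ∈ L, l ∈ gs ∧ l ∈ ws) →
    ∀ (S : List Char) (rs : List Char), rs.length = 5 →
    (∀ l ∈ L, l ∉ S) →
    (∀ i : Nat, i < 5 → rs.getD i '-'
       = if i < gs.length ∧ gs.getD i ' ' ∈ S then pvSpecChar gs ws i else '-') →
    ((L.foldl (fun rs l => write_reward rs (pvLocs gs l) (pvLocs ws l)) rs).length = 5
    ∧ ∀ i : Nat, i < 5 →
        (L.foldl (fun rs l => write_reward rs (pvLocs gs l) (pvLocs ws l)) rs).getD i '-'
        = if i < gs.length ∧ gs.getD i ' ' ∈ S ++ L then pvSpecChar gs ws i else '-') := by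
  intro L
  induction L with
  | nil =>
      intro _ _ S rs hlen _ hinv
      simp only [List.foldl_nil, List.append_nil]
      exact ⟨hlen, hinv⟩
  | cons l L ih =>
      intro hnd hmm S rs hlen hS hinv
      have hlS : l ∉ S := hS l List.mem_cons_self
      obtain ⟨hrl, hwl⟩ := hmm l List.mem_cons_self
      have hrs0 : ∀ i : Nat, i < gs.length → gs.getD i ' ' = l → rs.getD i '-' = '-' := by
        intro i h1 h2
        rw [hinv i (by omega), if_neg (by rintro ⟨_, hmem⟩; rw [h2] at hmem; exact hlS hmem)]
      obtain ⟨hwlen, hwp⟩ := wr_spec gs ws hg l rs hlen hrs0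
      simp only [List.foldl_cons]
      have hinv' : ∀ i : Nat, i < 5 →
          (write_reward rs (pvLocs gs l) (pvLocs ws l)).getD i '-'
          = if i < gs.length ∧ gs.getD i ' ' ∈ S ++ [l] then pvSpecChar gs ws i else '-' := by
        intro i hi
        rw [hwp i hi]
        by_cases h1 : i < gs.length
        · by_cases h2 : gs.getD i ' ' = l
          · rw [if_pos ⟨h1, h2⟩, if_pos ⟨h1, List.mem_append.mpr (Or.inr (by rw [h2]; exact List.mem_singleton.mpr rfl))⟩]
          · rw [if_neg (fun hc => h2 hc.2), hinv i hi]
            by_cases h3 : gs.getD i ' ' ∈ S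
            · rw [if_pos ⟨h1, h3⟩, if_pos ⟨h1, List.mem_append.mpr (Or.inl h3)⟩]
            · rw [if_neg (fun hc => h3 hc.2), if_neg]
              rintro ⟨_, hmem⟩
              rcases List.mem_append.mp hmem with hc | hc
              · exact h3 hc
              · exact h2 (by simpa using hc)
        · rw [if_neg (fun hc => h1 hc.1), hinv i hi, if_neg (fun hc => h1 hc.1),
            if_neg (fun hc => h1 hc.1)]
      obtain ⟨ihl, ihp⟩ := ih (List.nodup_cons.mp hnd).2
        (fun l' hl' => hmm l' (List.mem_cons_of_mem _ hl'))
        (S ++ [l]) (write_reward rs (pvLocs gs l) (pvLocs ws l)) hwlen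
        (by
          intro l' hl'
          intro hc
          rcases List.mem_append.mp hc with hc' | hc'
          · exact hS l' (List.mem_cons_of_mem _ hl') hc'
          · exact (List.nodup_cons.mp hnd).1 (List.mem_singleton.mp hc' ▸ hl'))
        hinv'
      refine ⟨ihl, ?_⟩
      intro i hi
      rw [ihp i hi, List.append_assoc]
      rfl

lemma rewardA_eq_getD (gs ws : List Char) (hg : gs.length ≤ 5) :
    (pv_a_reward (letter_locations_dict gs) ws).length = 5
    ∧ ∀ i : Nat, i < 5 → (pv_a_reward (letter_locations_dict gs) ws).getD i '-'
        = if i < gs.length ∧ gs.getD i ' ' ∈ ws then pvSpecChar gs ws i else '-' := by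
  unfold pv_a_reward
  have hmem : ∀ l ∈ PySem.Set.inter (PySem.Set.ofList (letter_locations_dict gs).keys)
      (letter_locations_dict ws).keys, l ∈ gs ∧ l ∈ ws := by
    intro l hl
    obtain ⟨h1, h2⟩ := (PySem.Set.mem_inter _ _ _).mp hl
    constructor
    · have := (PySem.Set.mem_ofList _ _).mp h1
      have hct := (PySem.Dict.contains_iff_mem_keys _ _).mpr this
      rw [lld_contains] at hct
      exact of_decide_eq_true hct
    · have hct := (PySem.Dict.contains_iff_mem_keys _ _).mpr h2
      rw [lld_contains] at hct
      exact of_decide_eq_true hct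
  have hbody : (PySem.Set.inter (PySem.Set.ofList (letter_locations_dict gs).keys)
        (letter_locations_dict ws).keys).foldl
      (fun rs l => write_reward rs ((letter_locations_dict gs).getD l [])
        ((letter_locations_dict ws).getD l [])) (List.replicate 5 '-')
      = (PySem.Set.inter (PySem.Set.ofList (letter_locations_dict gs).keys)
        (letter_locations_dict ws).keys).foldl
      (fun rs l => write_reward rs (pvLocs gs l) (pvLocs ws l)) (List.replicate 5 '-') := by
    apply PySem.List.foldl_congr_mem
    intro acc l hl
    obtain ⟨h1, h2⟩ := hmem l hl
    rw [lld_getD, lld_getD, if_pos h1, if_pos h2]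
  rw [hbody]
  have := foldA gs ws hg _
    (PySem.Set.nodup_inter _ _ (PySem.Set.nodup_ofList _)) hmem
    [] (List.replicate 5 '-') (by simp)
    (by simp)
    (by
      intro i hi
      rw [List.getD_eq_getElem _ _ (by simpa using hi), List.getElem_replicate,
        if_neg (by rintro ⟨_, hmem2⟩; simp at hmem2)])
  have hiff : ∀ c : Char, c ∈ PySem.Set.inter (PySem.Set.ofList (letter_locations_dict gs).keys)
      (letter_locations_dict ws).keys ↔ (c ∈ gs ∧ c ∈ ws) := by
    intro c
    constructor
    · exact hmem c
    · rintro ⟨hcg, hcw⟩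
      refine (PySem.Set.mem_inter _ _ _).mpr ⟨?_, ?_⟩
      · exact (PySem.Set.mem_ofList _ _).mpr ((PySem.Dict.contains_iff_mem_keys _ _).mp
          (by rw [lld_contains]; exact decide_eq_true hcg))
      · exact (PySem.Dict.contains_iff_mem_keys _ _).mp
          (by rw [lld_contains]; exact decide_eq_true hcw)
  obtain ⟨h1, h2⟩ := this
  refine ⟨h1, ?_⟩
  intro i hi
  rw [h2 i hi]
  by_cases h3 : i < gs.length ∧ gs.getD i ' ' ∈ ws
  · have hcg : gs.getD i ' ' ∈ gs := by
      rw [List.getD_eq_getElem _ _ h3.1]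
      exact List.getElem_mem h3.1
    rw [if_pos h3, if_pos ⟨h3.1, by rw [List.nil_append]; exact (hiff _).mpr ⟨hcg, h3.2⟩⟩]
  · rw [if_neg h3, if_neg (by
      rintro ⟨hc1, hc2⟩
      rw [List.nil_append] at hc2
      exact h3 ⟨hc1, ((hiff _).mp hc2).2⟩)]

lemma rewardA_eq (gs ws : List Char) (hg : gs.length ≤ 5) :
    pv_a_reward (letter_locations_dict gs) ws = pvSpec gs ws := by
  obtain ⟨h1, h2⟩ := rewardA_eq_getD gs ws hg
  apply List.ext_getElem
  · rw [h1]; simp [pvSpec]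
  · intro i hi1 hi2
    have hi5 : i < 5 := by rw [h1] at hi1; exact hi1
    have := h2 i hi5
    rw [List.getD_eq_getElem _ _ hi1] at this
    rw [this]
    simp only [pvSpec, List.getElem_map, List.getElem_range]
    by_cases h3 : i < gs.length ∧ gs.getD i ' ' ∈ ws
    · rw [if_pos h3]
    · unfold pvSpecChar
      rw [if_neg h3]
      by_cases h4 : i < gs.length
      · have h5 : gs.getD i ' ' ∉ ws := fun hc => h3 ⟨h4, hc⟩
        have hex : pvExact gs ws i = false := by
          rw [Bool.eq_false_iff]
          intro hc
          obtain ⟨_, hw1, hw2⟩ := (pvExact_iff gs ws i).mp hc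
          exact h5 (by
            rw [hw2, List.getD_eq_getElem _ _ hw1]
            exact List.getElem_mem hw1)
        have hav : pvAvail0 gs ws (gs.getD i ' ') = 0 := by
          rw [pvAvail0_range, List.length_eq_zero_iff, List.filter_eq_nil_iff]
          intro j hj
          rw [List.mem_range] at hj
          simp only [Bool.and_eq_true, beq_iff_eq]
          rintro ⟨_, hc⟩
          exact h5 (by
            rw [← hc, List.getD_eq_getElem _ _ hj]
            exact List.getElem_mem hj)
        rw [hex]
        simp only [Bool.false_eq_true, if_false]
        rw [if_neg (by rintro ⟨_, hc⟩; rw [hav] at hc; omega)]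
      · have hex : pvExact gs ws i = false := pvExact_ge_gs gs ws i (by omega)
        rw [hex]
        simp only [Bool.false_eq_true, if_false]
        rw [if_neg (fun hc => h4 hc.1)]



lemma pv_insertBy_map {α β κ : Type} [LT κ] [DecidableLT κ] (h : α → β) (f : β → κ) (g : α → κ)
    (hfg : ∀ a, f (h a) = g a) (x : α) (ys : List α) :
    PySem.List.insertBy (fun a b => decide (f b < f a)) (h x) (ys.map h)
      = (PySem.List.insertBy (fun a b => decide (g b < g a)) x ys).map h := by
  induction ys with
  | nil => simp [PySem.List.insertBy]
  | cons y ys ih =>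
      simp only [List.map_cons, PySem.List.insertBy, hfg]
      split_ifs <;> simp [ih]

lemma pv_foldl_insertBy_map {α β κ : Type} [LT κ] [DecidableLT κ] (h : α → β) (f : β → κ) (g : α → κ)
    (hfg : ∀ a, f (h a) = g a) (ys : List α) (acc : List α) :
    (ys.map h).foldl (fun acc x => PySem.List.insertBy (fun a b => decide (f b < f a)) x acc) (acc.map h)
      = (ys.foldl (fun acc x => PySem.List.insertBy (fun a b => decide (g b < g a)) x acc) acc).map h := by
  induction ys generalizing acc with
  | nil => simp
  | cons y ys ih =>
      simp only [List.map_cons, List.foldl_cons]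
      rw [pv_insertBy_map h f g hfg y acc]
      exact ih _

lemma pv_sorted_map_key {α β κ : Type} [LT κ] [DecidableLT κ] (h : α → β) (f : β → κ) (g : α → κ)
    (hfg : ∀ a, f (h a) = g a) (xs : List α) :
    PySem.List.sorted (xs.map h) f true = (PySem.List.sorted xs g true).map h := by
  rw [PySem.List.sorted_rev_eq_foldl_insertBy, PySem.List.sorted_rev_eq_foldl_insertBy]
  exact pv_foldl_insertBy_map h f g hfg xs []

lemma tail_eq (sd : PySem.Dict String (List String)) (h : sd.keys.Nodup) :
    (let len_dict : PySem.Dict String Int := sd.keys.foldl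
        (fun d key => d.insert key (PySem.List.len (sd.getD key []))) PySem.Dict.empty
     let sorted_len := PySem.List.sorted len_dict.items (fun x => x.2) true
     let ret_dict : PySem.Dict String (List String) := (sorted_len.map (fun kv => kv.1)).foldl
        (fun d key => d.insert key (sd.getD key [])) PySem.Dict.empty
     ret_dict.items)
    = ((PySem.List.sorted sd.items (fun kv => PySem.List.len kv.2) true).foldl
        (fun d kv => d.insert kv.1 kv.2) PySem.Dict.empty).items := by
  have hkeys : sd.keys = sd.items.map (fun kv => kv.1) := by simp [PySem.Dict.keys]
  have hitems := PySem.Dict.items_eq_map_keys sd h ([] : List String)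
  -- len_dict.items = sd.items.map h2
  have hlen : (sd.keys.foldl
      (fun d key => d.insert key (PySem.List.len (sd.getD key []))) PySem.Dict.empty).items
      = sd.items.map (fun kv => (kv.1, PySem.List.len kv.2)) := by
    rw [PySem.Dict.items_foldl_insert_fresh sd.keys (fun k => k)
      (fun key => PySem.List.len (sd.getD key [])) PySem.Dict.empty
      (fun a _ => PySem.Dict.contains_empty a) (by simpa using h)]
    rw [hitems]
    simp [List.map_map, Function.comp_def]
    rfl
  have hsorted : PySem.List.sorted (sd.items.map (fun kv => (kv.1, PySem.List.len kv.2)))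
        (fun x => x.2) true
      = (PySem.List.sorted sd.items (fun kv => PySem.List.len kv.2) true).map
        (fun kv => (kv.1, PySem.List.len kv.2)) :=
    pv_sorted_map_key _ _ _ (fun _ => rfl) _
  have hperm : ((PySem.List.sorted sd.items (fun kv => PySem.List.len kv.2) true).map
      (fun kv => kv.1)).Perm sd.keys := by
    rw [hkeys]
    exact (PySem.List.sorted_perm sd.items _ true).map _
  have hnd : ((PySem.List.sorted sd.items (fun kv => PySem.List.len kv.2) true).map
      (fun kv => kv.1)).Nodup := hperm.nodup_iff.mpr h
  have hgetD : ∀ kv ∈ PySem.List.sorted sd.items (fun kv => PySem.List.len kv.2) true,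
      sd.getD kv.1 [] = kv.2 := by
    intro kv hkv
    have : kv ∈ sd.items := (PySem.List.mem_sorted _ _ _ _).mp hkv
    rw [hitems] at this
    obtain ⟨k, _, rfl⟩ := List.mem_map.mp this
    rfl
  simp only []
  rw [hlen, hsorted, List.map_map]
  simp only [Function.comp_def]
  rw [PySem.Dict.items_foldl_insert_fresh
      ((PySem.List.sorted sd.items (fun kv => PySem.List.len kv.2) true).map (fun kv => kv.1))
      (fun k => k) (fun key => sd.getD key []) PySem.Dict.empty
      (fun a _ => PySem.Dict.contains_empty a) (by simpa using hnd)]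
  rw [PySem.Dict.items_foldl_insert_fresh
      (PySem.List.sorted sd.items (fun kv => PySem.List.len kv.2) true)
      (fun kv => kv.1) (fun kv => kv.2) PySem.Dict.empty
      (fun a _ => PySem.Dict.contains_empty _) hnd]
  simp only [List.map_map]
  apply List.map_congr_left
  intro kv hkv
  simp [hgetD kv hkv]


-- ===== VERDICT (by name: the statement is the Claim_ definition above) =====
theorem assemble_wordlists_spec : Claim_equal_assemble_wordlists := by
  intro guess wordlist _ hpre
  unfold Spec_assemble_wordlists assemble_wordlists assemble_wordlists_alt
  rcases hpre with hg | rfl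
  · have hsplit : wordlist.foldl
        (fun sd word => sd.modify (String.ofList (pv_a_reward (letter_locations_dict guess.toList) word.toList)) [] (· ++ [word]))
        PySem.Dict.empty
      = wordlist.foldl
        (fun sd word => sd.modify (String.ofList (pv_score guess.toList word.toList)) [] (· ++ [word]))
        PySem.Dict.empty := by
      apply PySem.List.foldl_congr_mem
      intro acc word _
      rw [rewardA_eq _ _ hg, scoreB_eq _ _ hg]
    simp only [hsplit]
    exact tail_eq _ (PySem.Dict.nodup_keys_foldl_modify_key wordlist
      (fun word => String.ofList (pv_score guess.toList word.toList)) [] (fun _ word v => v ++ [word])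
      PySem.Dict.empty (by simp [PySem.Dict.keys_empty]))
  · rfl
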